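-- pv_equiv track=rewrite | github.com/scikit-hep/pyhf | pyhf/modifiers/combined.py | generate_shapes_histos
-- ===== SOURCE A (Python) =====
-- def generate_shapes_histos(histogramssets):
--     h_shape = [len(histogramssets),0,0,0]
--     r_shape = [len(histogramssets),0,0]
--
--     for hs in histogramssets:
--         h_shape[1] = max(h_shape[1],len(hs))
--         for h in hs:
--             h_shape[2] = max(h_shape[2],len(h))
--             for sh in h:
--                 h_shape[3] = max(h_shape[3],len(sh))
--     return tuple(h_shape),tuple(h_shape[:-2]+[1]+h_shape[-1:])
-- ===== SOURCE B (Python) =====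
-- def generate_shapes_histos(histogramssets):
--     # Bottom-up recursion on the nested structure: each subtree reports its own
--     # shape vector (its length followed by its children's merged shape), and a
--     # parent merges its children's shape vectors by pointwise max.
--     def shape(node, depth):
--         if depth == 0:
--             return ()
--         merged = (0,) * (depth - 1)
--         for child in node:
--             merged = tuple(map(max, merged, shape(child, depth - 1)))
--         return (len(node),) + merged
--     n, d1, d2, d3 = shape(histogramssets, 4)
--     return (n, d1, d2, d3), (n, d1, 1, d3)
-- ===== Notes on version B (the rewrite author's own statement) =====
-- stated objective: alternative
-- what changed: Replaces A's single interleaved triple-nested loop threading three global accumulators with a bottom-up recursion on the nested structure: each subtree computes its own shape vector (length plus merged child shape) and a parent merges child shape vectors by pointwise max; both output tuples are built directly and the unused r_shape is dropped.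
import Mathlib
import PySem

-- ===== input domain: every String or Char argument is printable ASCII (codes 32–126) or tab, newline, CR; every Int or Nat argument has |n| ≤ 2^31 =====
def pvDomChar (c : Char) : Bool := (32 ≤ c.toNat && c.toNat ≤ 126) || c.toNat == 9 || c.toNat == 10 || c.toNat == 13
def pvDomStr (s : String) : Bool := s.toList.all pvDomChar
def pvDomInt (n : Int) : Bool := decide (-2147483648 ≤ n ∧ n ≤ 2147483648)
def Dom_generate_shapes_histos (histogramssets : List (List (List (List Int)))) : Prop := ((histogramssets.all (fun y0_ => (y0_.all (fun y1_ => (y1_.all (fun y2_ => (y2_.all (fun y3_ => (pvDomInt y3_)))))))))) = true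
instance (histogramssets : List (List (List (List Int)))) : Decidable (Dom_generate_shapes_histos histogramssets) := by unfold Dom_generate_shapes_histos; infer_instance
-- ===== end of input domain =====

-- B replaces A's single interleaved triple-nested loop (three global accumulators in one
-- traversal, plus the unused r_shape) with a bottom-up recursion: each subtree computes its
-- own shape vector and parents merge child shapes by pointwise max (objective: alternative).


-- ===== PORT A =====
-- literal transliteration of A: one traversal threading the three maxima (s1,s2,s3);
-- r_shape is computed and unused, as in A; the second tuple is h_shape[:-2] ++ [1] ++ h_shape[-1:]
def generate_shapes_histos (histogramssets : List (List (List (List Int)))) : List Int × List Int :=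
  let s : Int × Int × Int :=
    histogramssets.foldl (fun st hs =>
      let s1 := max st.1 (hs.length : Int)
      let inner : Int × Int :=
        hs.foldl (fun st2 h =>
          let s2 := max st2.1 (h.length : Int)
          let s3 := h.foldl (fun s3 sh => max s3 (sh.length : Int)) st2.2
          (s2, s3)) (st.2.1, st.2.2)
      (s1, inner.1, inner.2)) (0, 0, 0)
  let h_shape : List Int := [(histogramssets.length : Int), s.1, s.2.1, s.2.2]
  let _r_shape : List Int := [(histogramssets.length : Int), 0, 0]
  (h_shape, h_shape.take 2 ++ [1] ++ h_shape.drop 3)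

-- ===== PORT B =====
-- B's recursive shape(node, depth) specialised to the fixed depths 1..4 (the tuple lengths
-- differ per depth, so each depth gets its own Lean function; the code is B's, level by level:
-- merge children's shape vectors by pointwise max, then prepend the node's own length)
def pvShapeD1 (node : List Int) : Int :=
  (node.length : Int)

def pvShapeD2 (node : List (List Int)) : Int × Int :=
  let merged : Int := node.foldl (fun m child => max m (pvShapeD1 child)) 0
  ((node.length : Int), merged)

def pvShapeD3 (node : List (List (List Int))) : Int × Int × Int :=
  let merged : Int × Int := node.foldl (fun m child =>
    let t := pvShapeD2 child
    (max m.1 t.1, max m.2 t.2)) (0, 0)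
  ((node.length : Int), merged.1, merged.2)

def pvShapeD4 (node : List (List (List (List Int)))) : Int × Int × Int × Int :=
  let merged : Int × Int × Int := node.foldl (fun m child =>
    let t := pvShapeD3 child
    (max m.1 t.1, max m.2.1 t.2.1, max m.2.2 t.2.2)) (0, 0, 0)
  ((node.length : Int), merged.1, merged.2.1, merged.2.2)

def generate_shapes_histos_alt (histogramssets : List (List (List (List Int)))) : List Int × List Int :=
  let s := pvShapeD4 histogramssets
  ([s.1, s.2.1, s.2.2.1, s.2.2.2], [s.1, s.2.1, 1, s.2.2.2])

-- ===== PRECONDITION & SPEC =====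
def Spec_generate_shapes_histos (histogramssets : List (List (List (List Int)))) (out : List Int × List Int) : Prop := out = generate_shapes_histos_alt histogramssets
instance (histogramssets : List (List (List (List Int)))) (out : List Int × List Int) : Decidable (Spec_generate_shapes_histos histogramssets out) := by unfold Spec_generate_shapes_histos; infer_instance

-- ===== CLAIM (what is proved, stated in full; the proofs are below) =====
def Claim_equal_generate_shapes_histos : Prop := ∀ (histogramssets : List (List (List (List Int)))), Dom_generate_shapes_histos histogramssets → Spec_generate_shapes_histos histogramssets (generate_shapes_histos histogramssets)

-- ===== LEMMAS AND PROOFS =====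

-- max-fold over mapped values, seeded at a (characterises both programs' maxima)
def pvMaxF {α : Type} (g : α → Int) (l : List α) (a : Int) : Int :=
  l.foldl (fun s x => max s (g x)) a

theorem pvMaxF_append {α : Type} (g : α → Int) (l1 l2 : List α) (a : Int) :
    pvMaxF g (l1 ++ l2) a = pvMaxF g l2 (pvMaxF g l1 a) := by
  simp [pvMaxF, List.foldl_append]

theorem pvMaxF_seed_max {α : Type} (g : α → Int) (l : List α) :
    ∀ a b : Int, pvMaxF g l (max a b) = max a (pvMaxF g l b) := by
  induction l with
  | nil => intro a b; simp [pvMaxF]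
  | cons x l ih =>
      intro a b
      show pvMaxF g l (max (max a b) (g x)) = max a (pvMaxF g l (max b (g x)))
      rw [max_assoc, ih]

theorem pvMaxF_seed_nonneg {α : Type} (g : α → Int) (l : List α) (a : Int) (ha : 0 ≤ a) :
    pvMaxF g l a = max a (pvMaxF g l 0) := by
  rw [← pvMaxF_seed_max]
  congr 1
  omega

-- A's inner two loops equal independent maxima over hs and its flattening
theorem inner_eq (hs : List (List (List Int))) : ∀ (b c : Int),
    hs.foldl (fun (st2 : Int × Int) h =>
        (max st2.1 (h.length : Int),
         h.foldl (fun s3 sh => max s3 (sh.length : Int)) st2.2)) (b, c)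
      = (pvMaxF (fun h => (h.length : Int)) hs b,
         pvMaxF (fun sh => (sh.length : Int)) hs.flatten c) := by
  induction hs with
  | nil => intro b c; simp [pvMaxF]
  | cons h hs ih =>
      intro b c
      simp only [List.foldl_cons, List.flatten_cons]
      rw [ih]
      simp [pvMaxF, List.foldl_append]

-- A's outer loop equals the three independent maxima
theorem outer_eq (hss : List (List (List (List Int)))) : ∀ (a b c : Int),
    hss.foldl (fun (st : Int × Int × Int) hs =>
        let s1 := max st.1 (hs.length : Int)
        let inner : Int × Int :=
          hs.foldl (fun st2 h =>
            let s2 := max st2.1 (h.length : Int)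
            let s3 := h.foldl (fun s3 sh => max s3 (sh.length : Int)) st2.2
            (s2, s3)) (st.2.1, st.2.2)
        (s1, inner.1, inner.2)) (a, b, c)
      = (pvMaxF (fun hs => (hs.length : Int)) hss a,
         pvMaxF (fun h => (h.length : Int)) hss.flatten b,
         pvMaxF (fun sh => (sh.length : Int)) hss.flatten.flatten c) := by
  induction hss with
  | nil => intro a b c; simp [pvMaxF]
  | cons hs hss ih =>
      intro a b c
      simp only [List.foldl_cons, List.flatten_cons]
      rw [inner_eq hs b c, ih]
      simp [pvMaxF, List.foldl_append]

-- B's per-depth shapes are the same independent maxima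
theorem shapeD2_eq (h : List (List Int)) :
    pvShapeD2 h = ((h.length : Int), pvMaxF (fun sh => (sh.length : Int)) h 0) := rfl

theorem shapeD3_merge (hs : List (List (List Int))) : ∀ (b c : Int), 0 ≤ b → 0 ≤ c →
    hs.foldl (fun (m : Int × Int) child =>
        (max m.1 (pvShapeD2 child).1, max m.2 (pvShapeD2 child).2)) (b, c)
      = (pvMaxF (fun h => (h.length : Int)) hs b,
         pvMaxF (fun sh => (sh.length : Int)) hs.flatten c) := by
  induction hs with
  | nil => intro b c _ _; simp [pvMaxF]
  | cons h hs ih =>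
      intro b c hb hc
      simp only [List.foldl_cons, List.flatten_cons]
      rw [ih _ _ (le_trans hb (le_max_left _ _)) (le_trans hc (le_max_left _ _))]
      simp only [shapeD2_eq, pvMaxF_append]
      congr 1
      rw [pvMaxF_seed_nonneg _ _ c hc]

theorem shapeD3_eq (hs : List (List (List Int))) :
    pvShapeD3 hs = ((hs.length : Int),
      pvMaxF (fun h => (h.length : Int)) hs 0,
      pvMaxF (fun sh => (sh.length : Int)) hs.flatten 0) := by
  have h0 := shapeD3_merge hs 0 0 le_rfl le_rfl
  show ((hs.length : Int),
      (hs.foldl (fun (m : Int × Int) child =>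
        (max m.1 (pvShapeD2 child).1, max m.2 (pvShapeD2 child).2)) (0, 0)).1,
      (hs.foldl (fun (m : Int × Int) child =>
        (max m.1 (pvShapeD2 child).1, max m.2 (pvShapeD2 child).2)) (0, 0)).2) = _
  rw [h0]

theorem shapeD4_merge (hss : List (List (List (List Int)))) :
    ∀ (a b c : Int), 0 ≤ a → 0 ≤ b → 0 ≤ c →
    hss.foldl (fun (m : Int × Int × Int) child =>
        (max m.1 (pvShapeD3 child).1, max m.2.1 (pvShapeD3 child).2.1,
         max m.2.2 (pvShapeD3 child).2.2)) (a, b, c)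
      = (pvMaxF (fun hs => (hs.length : Int)) hss a,
         pvMaxF (fun h => (h.length : Int)) hss.flatten b,
         pvMaxF (fun sh => (sh.length : Int)) hss.flatten.flatten c) := by
  induction hss with
  | nil => intro a b c _ _ _; simp [pvMaxF]
  | cons hs hss ih =>
      intro a b c ha hb hc
      simp only [List.foldl_cons, List.flatten_cons]
      rw [ih _ _ _ (le_trans ha (le_max_left _ _)) (le_trans hb (le_max_left _ _))
            (le_trans hc (le_max_left _ _))]
      simp only [shapeD3_eq, List.flatten_append, pvMaxF_append]
      refine congrArg₂ Prod.mk rfl (congrArg₂ Prod.mk ?_ ?_)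
      · rw [pvMaxF_seed_nonneg _ _ b hb]
      · rw [pvMaxF_seed_nonneg _ _ c hc]

theorem shapeD4_eq (hss : List (List (List (List Int)))) :
    pvShapeD4 hss = ((hss.length : Int),
      pvMaxF (fun hs => (hs.length : Int)) hss 0,
      pvMaxF (fun h => (h.length : Int)) hss.flatten 0,
      pvMaxF (fun sh => (sh.length : Int)) hss.flatten.flatten 0) := by
  have h0 := shapeD4_merge hss 0 0 0 le_rfl le_rfl le_rfl
  show ((hss.length : Int),
      (hss.foldl (fun (m : Int × Int × Int) child =>
        (max m.1 (pvShapeD3 child).1, max m.2.1 (pvShapeD3 child).2.1,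
         max m.2.2 (pvShapeD3 child).2.2)) (0, 0, 0)).1,
      (hss.foldl (fun (m : Int × Int × Int) child =>
        (max m.1 (pvShapeD3 child).1, max m.2.1 (pvShapeD3 child).2.1,
         max m.2.2 (pvShapeD3 child).2.2)) (0, 0, 0)).2.1,
      (hss.foldl (fun (m : Int × Int × Int) child =>
        (max m.1 (pvShapeD3 child).1, max m.2.1 (pvShapeD3 child).2.1,
         max m.2.2 (pvShapeD3 child).2.2)) (0, 0, 0)).2.2) = _
  rw [h0]

-- ===== VERDICT (by name: the statement is the Claim_ definition above) =====
theorem generate_shapes_histos_spec : Claim_equal_generate_shapes_histos := by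
  intro hss _
  show generate_shapes_histos hss = generate_shapes_histos_alt hss
  simp only [generate_shapes_histos, generate_shapes_histos_alt, outer_eq, shapeD4_eq]
  rfl
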